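-- pv_equiv track=rewrite | github.com/sahyslop/resource-finder | src/fetch_api_resources.py | infer_category_from_taxonomy
-- ===== SOURCE A (Python) =====
-- def infer_category_from_taxonomy(codes: list, description: str = "") -> list:
--     """Map 211 taxonomy codes to project service_category values."""
--     cats = set()
--     code_str = " ".join(str(c) for c in codes).upper()
--     desc_lc = description.lower()
--
--     if "BD-18" in code_str or "food" in desc_lc or "pantry" in desc_lc or "meal" in desc_lc:
--         cats.add("food_pantry")
--     if "BH-18" in code_str or "shelter" in desc_lc or "overnight" in desc_lc:
--         cats.add("shelter")
--     if "BH-30" in code_str or "housing" in desc_lc or "rental" in desc_lc: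
--         cats.add("housing_assistance")
--
--     return sorted(cats) or ["shelter"]
-- ===== SOURCE B (Python) =====
-- # Closed-form re-implementation: evaluate the three category conditions as bits
-- # and index a precomputed table of all 8 possible results (fallback included at 0)
-- # -- no set, no sort, no fallback branch at run time.
-- _OUT = [
--     ["shelter"],                                           # 000: fallback
--     ["housing_assistance"],                                # 001
--     ["shelter"],                                           # 010
--     ["housing_assistance", "shelter"],                     # 011
--     ["food_pantry"],                                       # 100
--     ["food_pantry", "housing_assistance"],                 # 101
--     ["food_pantry", "shelter"],                            # 110
--     ["food_pantry", "housing_assistance", "shelter"],      # 111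
-- ]
--
--
-- def infer_category_from_taxonomy(codes: list, description: str = "") -> list:
--     code_str = " ".join(str(c) for c in codes).upper()
--     d = description.lower()
--     f = "BD-18" in code_str or "food" in d or "pantry" in d or "meal" in d
--     s = "BH-18" in code_str or "shelter" in d or "overnight" in d
--     h = "BH-30" in code_str or "housing" in d or "rental" in d
--     return list(_OUT[4 * f + 2 * s + h])
-- ===== Notes on version B (the rewrite author's own statement) =====
-- stated objective: alternative
-- what changed: Replaces set accumulation, sorted() and the or-fallback with a closed-form lookup: the three category conditions become bits of an index into a precomputed table of all 8 possible (already sorted, fallback-included) results.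
import Mathlib
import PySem

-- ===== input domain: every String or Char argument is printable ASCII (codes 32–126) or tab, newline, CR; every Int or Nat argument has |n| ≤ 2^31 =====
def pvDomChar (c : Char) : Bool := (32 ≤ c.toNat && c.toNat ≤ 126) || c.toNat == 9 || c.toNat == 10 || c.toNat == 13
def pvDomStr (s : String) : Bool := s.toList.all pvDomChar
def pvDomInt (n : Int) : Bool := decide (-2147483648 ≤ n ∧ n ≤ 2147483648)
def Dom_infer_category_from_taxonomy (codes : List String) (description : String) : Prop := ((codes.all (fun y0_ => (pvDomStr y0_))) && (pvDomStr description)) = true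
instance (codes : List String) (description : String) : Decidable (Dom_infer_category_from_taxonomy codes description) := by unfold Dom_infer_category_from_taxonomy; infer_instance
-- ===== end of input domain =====

-- B replaces A's set accumulation + sorted() + or-fallback with a closed-form lookup:
-- the three conditions are bits of an index into a precomputed table of all 8 results
-- (objective: alternative; same cost).
-- ===== PORT A =====
def infer_category_from_taxonomy (codes : List String) (description : String) : List String :=
  let cats : PySem.Set String := PySem.Set.empty
  let code_str := PySem.Str.upper (PySem.Str.join " " codes)
  let desc_lc := PySem.Str.lower description
  let cats := if PySem.Str.isIn "BD-18" code_str || PySem.Str.isIn "food" desc_lc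
                 || PySem.Str.isIn "pantry" desc_lc || PySem.Str.isIn "meal" desc_lc then
                PySem.Set.add cats "food_pantry" else cats
  let cats := if PySem.Str.isIn "BH-18" code_str || PySem.Str.isIn "shelter" desc_lc
                 || PySem.Str.isIn "overnight" desc_lc then
                PySem.Set.add cats "shelter" else cats
  let cats := if PySem.Str.isIn "BH-30" code_str || PySem.Str.isIn "housing" desc_lc
                 || PySem.Str.isIn "rental" desc_lc then
                PySem.Set.add cats "housing_assistance" else cats
  let s := PySem.List.sorted cats (fun x => x) false
  if s = [] then ["shelter"] else s

-- ===== PORT B =====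
-- table of all 8 possible results, indexed by the condition bits 4f+2s+h
def pvOut : List (List String) :=
  [["shelter"],
   ["housing_assistance"],
   ["shelter"],
   ["housing_assistance", "shelter"],
   ["food_pantry"],
   ["food_pantry", "housing_assistance"],
   ["food_pantry", "shelter"],
   ["food_pantry", "housing_assistance", "shelter"]]

def infer_category_from_taxonomy_alt (codes : List String) (description : String) : List String :=
  let code_str := PySem.Str.upper (PySem.Str.join " " codes)
  let d := PySem.Str.lower description
  let f := PySem.Str.isIn "BD-18" code_str || PySem.Str.isIn "food" d
             || PySem.Str.isIn "pantry" d || PySem.Str.isIn "meal" d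
  let s := PySem.Str.isIn "BH-18" code_str || PySem.Str.isIn "shelter" d
             || PySem.Str.isIn "overnight" d
  let h := PySem.Str.isIn "BH-30" code_str || PySem.Str.isIn "housing" d
             || PySem.Str.isIn "rental" d
  pvOut.getD (4 * (if f then 1 else 0) + 2 * (if s then 1 else 0) + (if h then 1 else 0)) []

-- ===== PRECONDITION & SPEC =====
def Spec_infer_category_from_taxonomy (codes : List String) (description : String) (out : List String) : Prop := out = infer_category_from_taxonomy_alt codes description
instance (codes : List String) (description : String) (out : List String) : Decidable (Spec_infer_category_from_taxonomy codes description out) := by unfold Spec_infer_category_from_taxonomy; infer_instance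

-- ===== CLAIM (what is proved, stated in full; the proofs are below) =====
def Claim_equal_infer_category_from_taxonomy : Prop := ∀ (codes : List String) (description : String), Dom_infer_category_from_taxonomy codes description → Spec_infer_category_from_taxonomy codes description (infer_category_from_taxonomy codes description)

-- ===== LEMMAS AND PROOFS =====

-- ===== VERDICT (by name: the statement is the Claim_ definition above) =====
set_option maxHeartbeats 2000000 in
theorem infer_category_from_taxonomy_spec : Claim_equal_infer_category_from_taxonomy := by
  intro codes description _
  unfold Spec_infer_category_from_taxonomy infer_category_from_taxonomy infer_category_from_taxonomy_alt
  simp only [Bool.or_assoc]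
  generalize (PySem.Str.isIn "BD-18" (PySem.Str.upper (PySem.Str.join " " codes))
      || (PySem.Str.isIn "food" (PySem.Str.lower description)
      || (PySem.Str.isIn "pantry" (PySem.Str.lower description)
      || PySem.Str.isIn "meal" (PySem.Str.lower description)))) = c1
  generalize (PySem.Str.isIn "BH-18" (PySem.Str.upper (PySem.Str.join " " codes))
      || (PySem.Str.isIn "shelter" (PySem.Str.lower description)
      || PySem.Str.isIn "overnight" (PySem.Str.lower description))) = c2
  generalize (PySem.Str.isIn "BH-30" (PySem.Str.upper (PySem.Str.join " " codes))
      || (PySem.Str.isIn "housing" (PySem.Str.lower description)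
      || PySem.Str.isIn "rental" (PySem.Str.lower description))) = c3
  rcases c1 <;> rcases c2 <;> rcases c3 <;>
    simp [PySem.List.sorted_eq_foldl_insertBy, PySem.List.insertBy, PySem.Set.add,
          PySem.Set.empty, PySem.Set.contains, pvOut] <;> decide
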